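-- pv_equiv track=rewrite | github.com/kevingrip/figus | Funciones.py | separacion
-- ===== SOURCE A (Python) =====
-- def separacion (figuritas):
--
--
--
--     numeros='1234567890'
--     figuritas_nuevo=''
--     figuritas_nuevo_2=''
--
--
--
--     for i in figuritas:
--         if i==' ' and ant in numeros:
--             figuritas_nuevo=figuritas_nuevo+'|'
--         else:
--             figuritas_nuevo=figuritas_nuevo+i
--         if i in numeros:
--             ant=i
--         else:
--             ant='x'
--
--
--
--     for i in figuritas_nuevo:
--         if i!=' ':
--             figuritas_nuevo_2=figuritas_nuevo_2+i
--     return figuritas_nuevo_2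
-- ===== SOURCE B (Python) =====
-- def separacion(figuritas):
--     # Stateless lookback: a space becomes '|' exactly when the character just
--     # before it is a digit; every other space disappears; other chars are kept.
--     digits = '1234567890'
--     parts = []
--     for i, c in enumerate(figuritas):
--         if c == ' ':
--             if i > 0 and figuritas[i - 1] in digits:
--                 parts.append('|')
--         else:
--             parts.append(c)
--     return ''.join(parts)
-- ===== Notes on version B (the rewrite author's own statement) =====
-- stated objective: simpler
-- what changed: Replaces A's two staged passes carrying previous-character state by a single stateless pass that decides each space by a direct index lookback figuritas[i-1], collecting pieces in a list joined once.
import Mathlib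
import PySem

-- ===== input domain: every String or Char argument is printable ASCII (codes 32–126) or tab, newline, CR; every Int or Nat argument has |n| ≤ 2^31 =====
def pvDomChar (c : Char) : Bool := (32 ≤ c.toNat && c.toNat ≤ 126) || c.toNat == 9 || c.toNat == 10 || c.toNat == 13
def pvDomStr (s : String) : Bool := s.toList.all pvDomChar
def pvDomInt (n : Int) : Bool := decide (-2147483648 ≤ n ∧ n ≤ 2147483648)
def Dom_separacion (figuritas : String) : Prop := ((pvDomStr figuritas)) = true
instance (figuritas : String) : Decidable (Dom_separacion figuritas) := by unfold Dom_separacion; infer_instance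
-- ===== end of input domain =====

-- B replaces A's two stateful passes by one stateless pass deciding each space by an
-- index lookback (simpler); equivalence on strings not starting with a space, where A raises NameError.

-- ===== PORT A =====
def pvDigits : List Char := ['1','2','3','4','5','6','7','8','9','0']

-- first loop of A: state (figuritas_nuevo, ant); the tracker's initial value is never
-- read under Pre_ (the first char is not ' '), so 'x' stands for 'uninitialized'
def pvStepA (st : List Char × Char) (i : Char) : List Char × Char :=
  (if i == ' ' && decide (st.2 ∈ pvDigits) then st.1 ++ ['|'] else st.1 ++ [i],
   if decide (i ∈ pvDigits) then i else 'x')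

def separacion (figuritas : String) : String :=
  let figuritas_nuevo := (figuritas.toList.foldl pvStepA ([], 'x')).1
  -- second loop of A: drop the remaining spaces
  String.mk (figuritas_nuevo.foldl (fun acc i => if i != ' ' then acc ++ [i] else acc) [])

-- ===== PORT B =====
-- body of B's single loop over enumerate(figuritas); figuritas[i-1] is ported with
-- pyGet? (exact: the guard 0 < i keeps the index in range, so it is always some)
def pvStepB (l : List Char) (acc : List Char) (p : Int × Char) : List Char :=
  if p.2 == ' ' then
    if decide (0 < p.1) && (PySem.List.pyGet? l (p.1 - 1)).any (fun c => decide (c ∈ pvDigits))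
    then acc ++ ['|'] else acc
  else acc ++ [p.2]

def separacion_alt (figuritas : String) : String :=
  let l := figuritas.toList
  String.mk ((PySem.List.enumerate l 0).foldl (pvStepB l) [])

-- ===== PRECONDITION & SPEC =====
-- Pre_ excludes exactly the strings whose first character is a space: Python A raises NameError there (its previous-character variable is referenced before assignment).
def Pre_separacion (figuritas : String) : Prop := figuritas.toList.head? ≠ some ' '
instance (figuritas : String) : Decidable (Pre_separacion figuritas) := by unfold Pre_separacion; infer_instance
def pvWitness_separacion : String := "12 3 a 7 "

def Spec_separacion (figuritas : String) (out : String) : Prop := out = separacion_alt figuritas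
instance (figuritas : String) (out : String) : Decidable (Spec_separacion figuritas out) := by unfold Spec_separacion; infer_instance

-- ===== CLAIM (what is proved, stated in full; the proofs are below) =====
def Claim_equal_separacion : Prop := ∀ (figuritas : String), Dom_separacion figuritas → Pre_separacion figuritas → Spec_separacion figuritas (separacion figuritas)

-- ===== LEMMAS AND PROOFS =====
-- canonical form: both ports' character lists equal pvCanon ant suffix
def pvDig (c : Char) : Char := if decide (c ∈ pvDigits) then c else 'x'

def pvCanon : Char → List Char → List Char
  | _, [] => []
  | ant, c :: t =>
      (if c = ' ' then (if ant ∈ pvDigits then ['|'] else []) else [c]) ++ pvCanon (pvDig c) t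

-- A's second loop is List.filter
theorem pvFoldFilter (l acc : List Char) :
    l.foldl (fun acc i => if i != ' ' then acc ++ [i] else acc) acc
      = acc ++ l.filter (fun i => i != ' ') := by
  induction l generalizing acc with
  | nil => simp
  | cons c t ih =>
    simp only [List.foldl_cons, List.filter_cons, ih]
    by_cases h : c = ' ' <;> simp [h]

-- filtering A's first-loop output is pvCanon
theorem pvAKey (l : List Char) (ant : Char) (a : List Char) :
    ((l.foldl pvStepA (a, ant)).1).filter (fun i => i != ' ')
      = a.filter (fun i => i != ' ') ++ pvCanon ant l := by
  induction l generalizing ant a with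
  | nil => simp [pvCanon]
  | cons c t ih =>
    simp only [List.foldl_cons, pvStepA, pvCanon]
    by_cases hc : c = ' '
    · subst hc
      by_cases ha : ant ∈ pvDigits <;>
        simp [ha, ih, List.filter_append, pvDig, (by decide : (' ' : Char) ∉ pvDigits)]
    · have hc' : (c == ' ') = false := by simp [hc]
      simp [hc', ih, List.filter_append, hc, pvDig]

-- the previous-character tracker A carries at position pre.length, read off the prefix
def pvAntOf (pre : List Char) : Char :=
  match pre.getLast? with
  | none => 'x'
  | some z => pvDig z

-- B's loop over the enumerated suffix is pvCanon of that suffix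
theorem pvBKey (l : List Char) (suf pre : List Char) (h : l = pre ++ suf) (acc : List Char) :
    (PySem.List.enumerate suf (pre.length : Int)).foldl (pvStepB l) acc
      = acc ++ pvCanon (pvAntOf pre) suf := by
  induction suf generalizing pre acc with
  | nil => simp [pvCanon]
  | cons c t ih =>
    rw [PySem.List.enumerate_cons, List.foldl_cons]
    have hstep : pvStepB l acc ((pre.length : Int), c)
        = acc ++ (if c = ' ' then (if pvAntOf pre ∈ pvDigits then ['|'] else []) else [c]) := by
      unfold pvStepB
      by_cases hc : c = ' '
      · subst hc
        simp only [beq_self_eq_true, if_true]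
        cases hpre : pre.getLast? with
        | none =>
          have : pre = [] := List.getLast?_eq_none_iff.mp hpre
          subst this
          simp [pvAntOf, hpre, (by decide : ('x' : Char) ∉ pvDigits)]
        | some z =>
          obtain ⟨pre', rfl⟩ : ∃ pre', pre = pre' ++ [z] := by
            rcases List.eq_nil_or_concat pre with rfl | ⟨ys, y, rfl⟩
            · simp at hpre
            · simp at hpre; exact ⟨ys, by rw [hpre, List.concat_eq_append]⟩
          have hlen : (0 : Int) < ((pre' ++ [z]).length : Int) := by
            simp
          have hget : PySem.List.pyGet? l (((pre' ++ [z]).length : Int) - 1)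
              = some z := by
            have : (((pre' ++ [z]).length : Int) - 1) = ((pre'.length : Nat) : Int) := by
              simp
            rw [this, PySem.List.pyGet?_natCast, h]
            simp
          rw [hget]
          simp only [pvAntOf, hpre, Option.any_some]
          by_cases hz : z ∈ pvDigits <;>
            simp [hz, pvDig, (by decide : ('x' : Char) ∉ pvDigits)]
      · simp [hc]
    rw [hstep]
    have hlen' : ((pre.length : Int) + 1) = (((pre ++ [c]).length : Nat) : Int) := by
      simp
    rw [hlen', ih (pre ++ [c]) (by simp [h]) _]
    have hant : pvAntOf (pre ++ [c]) = pvDig c := by simp [pvAntOf]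
    rw [hant]
    conv_rhs => rw [pvCanon]
    simp

-- ===== VERDICT (by name: the statement is the Claim_ definition above) =====
theorem separacion_spec : Claim_equal_separacion := by
  intro s _ _
  unfold Spec_separacion separacion separacion_alt
  dsimp only
  rw [pvFoldFilter, List.nil_append, pvAKey s.toList 'x' []]
  have := pvBKey s.toList s.toList [] (by simp) []
  simp only [List.length_nil, Int.natCast_zero] at this
  rw [this]
  simp [pvAntOf]
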